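-- pv_equiv track=rewrite | github.com/HetanshWaghela/Pramana.AI | backend/src/agent/chatbot_graph.py | generate_thinking_content
-- ===== SOURCE A (Python) =====
-- def generate_thinking_content(user_message: str) -> str:
--     """Generate contextual thinking content based on the user's message."""
--     thinking_steps = []
--
--     message_lower = user_message.lower() if user_message else ""
--
--     # Add contextual thinking based on message content
--     if any(keyword in message_lower for keyword in ['market', 'opportunity', 'growth']):
--         thinking_steps.append("Analyzing market dynamics and identifying key opportunities...")
--         thinking_steps.append("Cross-referencing with industry trends and competitive landscape...")
--     elif any(keyword in message_lower for keyword in ['patent', 'ip', 'intellectual']):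
--         thinking_steps.append("Reviewing patent landscape and expiration timelines...")
--         thinking_steps.append("Assessing freedom-to-operate considerations...")
--     elif any(keyword in message_lower for keyword in ['clinical', 'trial', 'study']):
--         thinking_steps.append("Searching clinical trial databases for relevant studies...")
--         thinking_steps.append("Evaluating trial phases and endpoint data...")
--     elif any(keyword in message_lower for keyword in ['drug', 'molecule', 'compound']):
--         thinking_steps.append("Analyzing molecular properties and therapeutic potential...")
--         thinking_steps.append("Reviewing existing literature and research data...")
--     else:
--         thinking_steps.append("Processing your request and gathering relevant information...")
--         thinking_steps.append("Analyzing context and formulating comprehensive response...")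
--
--     thinking_steps.append("Synthesizing insights and preparing response...")
--
--     return "\n\n".join(thinking_steps)
-- ===== SOURCE B (Python) =====
-- _KEYWORDS = [
--     ("market", 0), ("opportunity", 0), ("growth", 0),
--     ("patent", 1), ("ip", 1), ("intellectual", 1),
--     ("clinical", 2), ("trial", 2), ("study", 2),
--     ("drug", 3), ("molecule", 3), ("compound", 3),
-- ]
--
-- _STEPS = [
--     ["Analyzing market dynamics and identifying key opportunities...",
--      "Cross-referencing with industry trends and competitive landscape..."],
--     ["Reviewing patent landscape and expiration timelines...",
--      "Assessing freedom-to-operate considerations..."],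
--     ["Searching clinical trial databases for relevant studies...",
--      "Evaluating trial phases and endpoint data..."],
--     ["Analyzing molecular properties and therapeutic potential...",
--      "Reviewing existing literature and research data..."],
--     ["Processing your request and gathering relevant information...",
--      "Analyzing context and formulating comprehensive response..."],
-- ]
--
--
-- def generate_thinking_content(user_message: str) -> str:
--     """Generate contextual thinking content based on the user's message."""
--     message_lower = user_message.lower() if user_message else ""
--     # One left-to-right scan of the message: at each position test every keyword
--     # and keep the minimum (highest-priority) category index seen; 4 = default.
--     best = 4
--     for i in range(len(message_lower)):
--         for kw, cat in _KEYWORDS: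
--             if cat < best and message_lower.startswith(kw, i):
--                 best = cat
--     steps = _STEPS[best] + ["Synthesizing insights and preparing response..."]
--     return "\n\n".join(steps)
-- ===== Notes on version B (the rewrite author's own statement) =====
-- stated objective: alternative
-- what changed: Replaces the four-branch elif chain of any()-substring-membership tests with a single left-to-right scan of the message that tests all twelve keywords at each position and keeps the minimum category index, then indexes a steps table with that index.
import Mathlib
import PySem

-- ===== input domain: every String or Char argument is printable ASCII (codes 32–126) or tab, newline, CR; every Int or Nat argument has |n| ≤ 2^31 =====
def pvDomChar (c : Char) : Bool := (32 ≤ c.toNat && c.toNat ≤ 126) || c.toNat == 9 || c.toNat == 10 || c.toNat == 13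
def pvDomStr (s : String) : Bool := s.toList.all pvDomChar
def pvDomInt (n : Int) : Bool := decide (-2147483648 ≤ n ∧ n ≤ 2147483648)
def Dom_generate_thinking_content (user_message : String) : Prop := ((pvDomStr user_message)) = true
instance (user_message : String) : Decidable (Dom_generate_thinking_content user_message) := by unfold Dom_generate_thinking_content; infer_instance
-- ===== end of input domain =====

-- B replaces the elif chain of substring-membership tests by one position scan of the
-- message keeping the minimum matched category index (objective: alternative, not faster).

-- ===== PORT A =====
def generate_thinking_content (user_message : String) : String :=
  let message_lower := if user_message ≠ "" then PySem.Str.lower user_message else ""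
  let thinking_steps : List String :=
    if ["market", "opportunity", "growth"].any (fun k => PySem.Str.isIn k message_lower) then
      ["Analyzing market dynamics and identifying key opportunities...",
       "Cross-referencing with industry trends and competitive landscape..."]
    else if ["patent", "ip", "intellectual"].any (fun k => PySem.Str.isIn k message_lower) then
      ["Reviewing patent landscape and expiration timelines...",
       "Assessing freedom-to-operate considerations..."]
    else if ["clinical", "trial", "study"].any (fun k => PySem.Str.isIn k message_lower) then
      ["Searching clinical trial databases for relevant studies...",
       "Evaluating trial phases and endpoint data..."]
    else if ["drug", "molecule", "compound"].any (fun k => PySem.Str.isIn k message_lower) then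
      ["Analyzing molecular properties and therapeutic potential...",
       "Reviewing existing literature and research data..."]
    else
      ["Processing your request and gathering relevant information...",
       "Analyzing context and formulating comprehensive response..."]
  let thinking_steps := thinking_steps ++ ["Synthesizing insights and preparing response..."]
  PySem.Str.join "\n\n" thinking_steps

-- ===== PORT B =====
def pvKeywords : List (List Char × Nat) :=
  [("market".toList, 0), ("opportunity".toList, 0), ("growth".toList, 0),
   ("patent".toList, 1), ("ip".toList, 1), ("intellectual".toList, 1),
   ("clinical".toList, 2), ("trial".toList, 2), ("study".toList, 2),
   ("drug".toList, 3), ("molecule".toList, 3), ("compound".toList, 3)]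

def pvSteps : List (List String) :=
  [["Analyzing market dynamics and identifying key opportunities...",
    "Cross-referencing with industry trends and competitive landscape..."],
   ["Reviewing patent landscape and expiration timelines...",
    "Assessing freedom-to-operate considerations..."],
   ["Searching clinical trial databases for relevant studies...",
    "Evaluating trial phases and endpoint data..."],
   ["Analyzing molecular properties and therapeutic potential...",
    "Reviewing existing literature and research data..."],
   ["Processing your request and gathering relevant information...",
    "Analyzing context and formulating comprehensive response..."]]

-- inner loop: 'for kw, cat in _KEYWORDS: if cat < best and message_lower.startswith(kw, i): best = cat'
-- (for 0 ≤ i < len, Python's startswith(kw, i) is exactly 'kw is a prefix of the i-th suffix')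
def pvInner (cl : List Char) (i : Nat) (b : Nat) : Nat :=
  pvKeywords.foldl
    (fun b e => if e.2 < b && PySem.Chars.startswith (cl.drop i) e.1 then e.2 else b) b

-- outer loop: 'for i in range(len(message_lower))', accumulator best starting at 4
def pvBest (cl : List Char) : Nat :=
  (List.range cl.length).foldl (fun b i => pvInner cl i b) 4

def generate_thinking_content_alt (user_message : String) : String :=
  let message_lower := if user_message ≠ "" then PySem.Str.lower user_message else ""
  let best := pvBest message_lower.toList
  -- _STEPS[best]: best ≤ 4 always (proved below), so plain getD is exact here
  let steps := pvSteps.getD best [] ++ ["Synthesizing insights and preparing response..."]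
  PySem.Str.join "\n\n" steps

-- ===== PRECONDITION & SPEC =====
def Spec_generate_thinking_content (user_message : String) (out : String) : Prop := out = generate_thinking_content_alt user_message
instance (user_message : String) (out : String) : Decidable (Spec_generate_thinking_content user_message out) := by unfold Spec_generate_thinking_content; infer_instance

-- ===== CLAIM (what is proved, stated in full; the proofs are below) =====
def Claim_equal_generate_thinking_content : Prop := ∀ (user_message : String), Dom_generate_thinking_content user_message → Spec_generate_thinking_content user_message (generate_thinking_content user_message)

-- ===== LEMMAS AND PROOFS =====

-- 'category c has a keyword occurring in cl'
def pvHit (cl : List Char) (c : Nat) : Prop :=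
  ∃ e ∈ pvKeywords, e.2 = c ∧ e.1 <:+: cl

-- generic characterization of the inner fold
theorem pvInner_fold_spec (cl : List Char) (i : Nat) (T : List (List Char × Nat)) (b : Nat) :
    (T.foldl (fun b e => if e.2 < b && PySem.Chars.startswith (cl.drop i) e.1 then e.2 else b) b) ≤ b
    ∧ ((T.foldl (fun b e => if e.2 < b && PySem.Chars.startswith (cl.drop i) e.1 then e.2 else b) b) = b
        ∨ ∃ e ∈ T, e.2 = (T.foldl (fun b e => if e.2 < b && PySem.Chars.startswith (cl.drop i) e.1 then e.2 else b) b) ∧ e.1 <+: cl.drop i)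
    ∧ (∀ e ∈ T, e.1 <+: cl.drop i → (T.foldl (fun b e => if e.2 < b && PySem.Chars.startswith (cl.drop i) e.1 then e.2 else b) b) ≤ e.2) := by
  induction T generalizing b with
  | nil => simp
  | cons e T ih =>
    simp only [List.foldl_cons, List.mem_cons]
    by_cases hp : PySem.Chars.startswith (cl.drop i) e.1 = true
    · have hpre : e.1 <+: cl.drop i := (PySem.Chars.startswith_iff _ _).mp hp
      by_cases hlt : e.2 < b
      · have hcond : (decide (e.2 < b) && PySem.Chars.startswith (cl.drop i) e.1) = true := by
          simp [hp, hlt]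
        rw [if_pos hcond]
        obtain ⟨h1, h2, h3⟩ := ih e.2
        refine ⟨le_trans h1 (le_of_lt hlt), ?_, ?_⟩
        · rcases h2 with h | h
          · exact Or.inr ⟨e, Or.inl rfl, h.symm, hpre⟩
          · rcases h with ⟨e', he', hv, hp'⟩; exact Or.inr ⟨e', Or.inr he', hv, hp'⟩
        · rintro e' (rfl | he') hp'
          · exact h1
          · exact h3 e' he' hp'
      · have hcond : ¬ ((decide (e.2 < b) && PySem.Chars.startswith (cl.drop i) e.1) = true) := by
          simp [hlt]
        rw [if_neg hcond]
        obtain ⟨h1, h2, h3⟩ := ih b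
        refine ⟨h1, ?_, ?_⟩
        · rcases h2 with h | h
          · exact Or.inl h
          · rcases h with ⟨e', he', hv, hp'⟩; exact Or.inr ⟨e', Or.inr he', hv, hp'⟩
        · rintro e' (rfl | he') hp'
          · exact le_trans h1 (Nat.le_of_not_lt hlt)
          · exact h3 e' he' hp'
    · have hcond : ¬ ((decide (e.2 < b) && PySem.Chars.startswith (cl.drop i) e.1) = true) := by
        simp [hp]
      rw [if_neg hcond]
      obtain ⟨h1, h2, h3⟩ := ih b
      refine ⟨h1, ?_, ?_⟩
      · rcases h2 with h | h
        · exact Or.inl h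
        · rcases h with ⟨e', he', hv, hp'⟩; exact Or.inr ⟨e', Or.inr he', hv, hp'⟩
      · rintro e' (rfl | he') hp'
        · exact absurd ((PySem.Chars.startswith_iff _ _).mpr hp') hp
        · exact h3 e' he' hp'

-- generic characterization of the outer fold
theorem pvOuter_fold_spec (cl : List Char) (l : List Nat) (b : Nat) :
    (l.foldl (fun b i => pvInner cl i b) b) ≤ b
    ∧ ((l.foldl (fun b i => pvInner cl i b) b) = b
        ∨ ∃ i ∈ l, ∃ e ∈ pvKeywords, e.2 = (l.foldl (fun b i => pvInner cl i b) b) ∧ e.1 <+: cl.drop i)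
    ∧ (∀ i ∈ l, ∀ e ∈ pvKeywords, e.1 <+: cl.drop i → (l.foldl (fun b i => pvInner cl i b) b) ≤ e.2) := by
  induction l generalizing b with
  | nil => simp
  | cons j l ih =>
    simp only [List.foldl_cons, List.mem_cons]
    obtain ⟨h1, h2, h3⟩ := ih (pvInner cl j b)
    obtain ⟨g1, g2, g3⟩ := pvInner_fold_spec cl j pvKeywords b
    refine ⟨le_trans h1 g1, ?_, ?_⟩
    · rcases h2 with h | h
      · rw [h]
        rcases g2 with g | g
        · exact Or.inl g
        · rcases g with ⟨e, he, hv, hp⟩; exact Or.inr ⟨j, Or.inl rfl, e, he, hv, hp⟩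
      · rcases h with ⟨i, hi, e, he, hv, hp⟩; exact Or.inr ⟨i, Or.inr hi, e, he, hv, hp⟩
    · rintro i (rfl | hi) e he hp
      · exact le_trans h1 (g3 e he hp)
      · exact h3 i hi e he hp

-- every keyword in the table is nonempty
theorem pvKeywords_ne_nil : ∀ e ∈ pvKeywords, e.1 ≠ [] := by decide

-- pvBest characterized through pvHit
theorem pvBest_spec (cl : List Char) :
    pvBest cl ≤ 4 ∧ (pvBest cl = 4 ∨ pvHit cl (pvBest cl)) ∧ (∀ c, pvHit cl c → pvBest cl ≤ c) := by
  obtain ⟨h1, h2, h3⟩ := pvOuter_fold_spec cl (List.range cl.length) 4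
  refine ⟨h1, ?_, ?_⟩
  · rcases h2 with h | h
    · exact Or.inl h
    · rcases h with ⟨i, _, e, he, hv, hp⟩
      exact Or.inr ⟨e, he, hv, hp.isInfix.trans (cl.drop_suffix i).isInfix⟩
  · rintro c ⟨e, he, rfl, hinf⟩
    obtain ⟨j, hpre⟩ := (PySem.Chars.exists_prefix_drop_iff_isIn e.1 cl).2
      ((PySem.Chars.isIn_iff_infix _ _).mpr hinf)
    have hj : j < cl.length := by
      by_contra hge
      rw [List.drop_eq_nil_of_le (Nat.le_of_not_lt hge)] at hpre
      exact pvKeywords_ne_nil e he (List.prefix_nil.mp hpre)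
    exact h3 j (List.mem_range.mpr hj) e he hpre

-- A's any-test for a category equals pvHit of the same category
theorem pvHit_iff (ml : String) (c : Nat) (ks : List String)
    (h : ∀ e ∈ pvKeywords, e.2 = c ↔ (∃ k ∈ ks, e.1 = k.toList))
    (hks : ∀ k ∈ ks, ∃ e ∈ pvKeywords, e.1 = k.toList ∧ e.2 = c) :
    (ks.any (fun k => PySem.Str.isIn k ml) = true) ↔ pvHit ml.toList c := by
  constructor
  · intro ha
    obtain ⟨k, hk, hin⟩ := List.any_eq_true.mp ha
    obtain ⟨e, he, hek, hec⟩ := hks k hk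
    exact ⟨e, he, hec, by rw [hek]; exact (PySem.Str.isIn_iff_infix _ _).mp hin⟩
  · rintro ⟨e, he, hec, hinf⟩
    obtain ⟨k, hk, hek⟩ := (h e he).mp hec
    exact List.any_eq_true.mpr ⟨k, hk, (PySem.Str.isIn_iff_infix _ _).mpr (hek ▸ hinf)⟩

theorem pvHit0 (ml : String) :
    (["market", "opportunity", "growth"].any (fun k => PySem.Str.isIn k ml) = true) ↔ pvHit ml.toList 0 :=
  pvHit_iff ml 0 _ (by decide) (by decide)

theorem pvHit1 (ml : String) :
    (["patent", "ip", "intellectual"].any (fun k => PySem.Str.isIn k ml) = true) ↔ pvHit ml.toList 1 :=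
  pvHit_iff ml 1 _ (by decide) (by decide)

theorem pvHit2 (ml : String) :
    (["clinical", "trial", "study"].any (fun k => PySem.Str.isIn k ml) = true) ↔ pvHit ml.toList 2 :=
  pvHit_iff ml 2 _ (by decide) (by decide)

theorem pvHit3 (ml : String) :
    (["drug", "molecule", "compound"].any (fun k => PySem.Str.isIn k ml) = true) ↔ pvHit ml.toList 3 :=
  pvHit_iff ml 3 _ (by decide) (by decide)

-- ===== VERDICT (by name: the statement is the Claim_ definition above) =====
theorem generate_thinking_content_spec : Claim_equal_generate_thinking_content := by
  intro u _
  unfold Spec_generate_thinking_content generate_thinking_content generate_thinking_content_alt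
  set ml := (if u ≠ "" then PySem.Str.lower u else "") with hml
  clear_value ml
  obtain ⟨hb4, hbhit, hbmin⟩ := pvBest_spec ml.toList
  by_cases h0 : ["market", "opportunity", "growth"].any (fun k => PySem.Str.isIn k ml) = true
  · have : pvBest ml.toList = 0 := Nat.le_zero.mp (hbmin 0 ((pvHit0 ml).mp h0))
    simp at h0
    simp [h0, this, pvSteps]
  · by_cases h1 : ["patent", "ip", "intellectual"].any (fun k => PySem.Str.isIn k ml) = true
    · have hle : pvBest ml.toList ≤ 1 := hbmin 1 ((pvHit1 ml).mp h1)
      have hne0 : pvBest ml.toList ≠ 0 := by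
        intro h
        rcases hbhit with h4 | hh
        · omega
        · exact h0 ((pvHit0 ml).mpr (h ▸ hh))
      have : pvBest ml.toList = 1 := by omega
      simp at h0 h1
      simp [h0, h1, this, pvSteps]
    · by_cases h2 : ["clinical", "trial", "study"].any (fun k => PySem.Str.isIn k ml) = true
      · have hle : pvBest ml.toList ≤ 2 := hbmin 2 ((pvHit2 ml).mp h2)
        have : pvBest ml.toList = 2 := by
          rcases hbhit with h4 | hh
          · omega
          · interval_cases h : pvBest ml.toList
            · exact absurd ((pvHit0 ml).mpr hh) h0
            · exact absurd ((pvHit1 ml).mpr hh) h1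
            · rfl
        simp at h0 h1 h2
        simp [h0, h1, h2, this, pvSteps]
      · by_cases h3 : ["drug", "molecule", "compound"].any (fun k => PySem.Str.isIn k ml) = true
        · have hle : pvBest ml.toList ≤ 3 := hbmin 3 ((pvHit3 ml).mp h3)
          have : pvBest ml.toList = 3 := by
            rcases hbhit with h4 | hh
            · omega
            · interval_cases h : pvBest ml.toList
              · exact absurd ((pvHit0 ml).mpr hh) h0
              · exact absurd ((pvHit1 ml).mpr hh) h1
              · exact absurd ((pvHit2 ml).mpr hh) h2
              · rfl
          simp at h0 h1 h2 h3
          simp [h0, h1, h2, h3, this, pvSteps]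
        · have : pvBest ml.toList = 4 := by
            rcases hbhit with h4 | hh
            · exact h4
            · interval_cases h : pvBest ml.toList
              · exact absurd ((pvHit0 ml).mpr hh) h0
              · exact absurd ((pvHit1 ml).mpr hh) h1
              · exact absurd ((pvHit2 ml).mpr hh) h2
              · exact absurd ((pvHit3 ml).mpr hh) h3
              · rfl
          simp at h0 h1 h2 h3
          simp [h0, h1, h2, h3, this, pvSteps]
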